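-- pv_equiv track=rewrite | github.com/paiml/depyler | examples/hard_memoization_patterns.py | sliding_window_distinct
-- ===== SOURCE A (Python) =====
-- def sliding_window_distinct(nums: list[int], k: int) -> int:
--     """Count windows of size k with all distinct elements.
--
--     Tests dict[int, int] as frequency counter with increment on add,
--     decrement on remove, key deletion when count reaches zero, and
--     window-size tracking against dict length.
--     """
--     n: int = len(nums)
--     if k > n or k <= 0:
--         return 0
--     freq: dict[int, int] = {}
--     distinct_count: int = 0
--     result: int = 0
--     for i in range(k):
--         val: int = nums[i]
--         if val in freq:
--             freq[val] += 1
--         else: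
--             freq[val] = 1
--             distinct_count += 1
--     if distinct_count == k:
--         result += 1
--     for i in range(k, n):
--         new_val: int = nums[i]
--         if new_val in freq:
--             freq[new_val] += 1
--         else:
--             freq[new_val] = 1
--             distinct_count += 1
--         old_val: int = nums[i - k]
--         freq[old_val] -= 1
--         if freq[old_val] == 0:
--             distinct_count -= 1
--         if distinct_count == k:
--             result += 1
--     return result
-- ===== SOURCE B (Python) =====
-- def sliding_window_distinct(nums: list[int], k: int) -> int:
--     """Count windows of size k with all distinct elements."""
--     if k > len(nums) or k <= 0:
--         return 0
--     return sum(1 for i in range(len(nums) - k + 1) if len(set(nums[i:i + k])) == k)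
-- ===== Notes on version B (the rewrite author's own statement) =====
-- stated objective: simpler
-- what changed: Replaces the incremental frequency-dict/distinct-counter sliding pass by a one-line scan that tests each window independently with a fresh set.
-- intended difference: On inputs where some value re-enters the window after having fully left it (its count reached 0 but A never deletes the key) and an all-distinct window occurs after that point, A's distinct counter is permanently understated so A undercounts (e.g. A returns 2 on ([1,2,3,1],2)); B returns the true count of all-distinct windows (3 there), which is what the docstring specifies. — e.g. on sliding_window_distinct([1, 2, 3, 1], 2): A returns 2, B returns 3
import Mathlib
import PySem

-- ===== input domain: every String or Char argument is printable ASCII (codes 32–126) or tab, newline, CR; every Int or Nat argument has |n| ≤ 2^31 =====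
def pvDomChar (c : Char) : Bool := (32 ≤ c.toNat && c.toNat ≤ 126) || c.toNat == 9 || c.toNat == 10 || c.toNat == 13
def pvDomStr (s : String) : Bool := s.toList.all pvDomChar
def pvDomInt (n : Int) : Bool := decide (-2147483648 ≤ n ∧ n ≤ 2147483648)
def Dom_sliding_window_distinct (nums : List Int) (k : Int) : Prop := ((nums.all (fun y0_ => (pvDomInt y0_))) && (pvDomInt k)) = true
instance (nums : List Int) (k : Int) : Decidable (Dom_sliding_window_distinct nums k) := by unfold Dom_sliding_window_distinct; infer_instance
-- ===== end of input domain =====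

-- B tests each window independently with a fresh set instead of A's incremental
-- frequency-dict/distinct-counter pass (objective: simpler, not faster); on inputs where a
-- value re-enters after fully leaving the window, A's counter goes stale and A undercounts —
-- stated below as the intended difference D_.

-- ===== PORT A =====
def sliding_window_distinct (nums : List Int) (k : Int) : Int :=
  let n : Int := (nums.length : Int)
  if k > n ∨ k ≤ 0 then 0
  else
    -- for i in range(k): add nums[i] to freq / distinct_count
    let st1 : PySem.Dict Int Int × Int :=
      (PySem.List.pyRange 0 k 1).foldl (fun st i =>
        let val := PySem.List.pyGetD nums i 0
        if st.1.contains val then (st.1.modify val 0 (· + 1), st.2)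
        else (st.1.insert val 1, st.2 + 1)) (PySem.Dict.empty, 0)
    let result : Int := if st1.2 = k then 0 + 1 else 0
    -- for i in range(k, n): slide the window
    let st2 : PySem.Dict Int Int × Int × Int :=
      (PySem.List.pyRange k n 1).foldl (fun st i =>
        let new_val := PySem.List.pyGetD nums i 0
        let st' : PySem.Dict Int Int × Int :=
          if st.1.contains new_val then (st.1.modify new_val 0 (· + 1), st.2.1)
          else (st.1.insert new_val 1, st.2.1 + 1)
        let old_val := PySem.List.pyGetD nums (i - k) 0
        let freq2 := st'.1.modify old_val 0 (· - 1)
        let dc2 := if freq2.getD old_val 0 = 0 then st'.2 - 1 else st'.2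
        let res2 := if dc2 = k then st.2.2 + 1 else st.2.2
        (freq2, dc2, res2)) (st1.1, st1.2, result)
    st2.2.2

-- ===== PORT B =====
def sliding_window_distinct_alt (nums : List Int) (k : Int) : Int :=
  if k > (nums.length : Int) ∨ k ≤ 0 then 0
  else
    (PySem.List.pyRange 0 ((nums.length : Int) - k + 1) 1).foldl (fun result i =>
      if ((PySem.Set.ofList (PySem.List.slice nums (some i) (some (i + k)))).length : Int) = k
      then result + 1 else result) 0

-- ===== PRECONDITION & SPEC =====

-- On inputs where some value nums[k+j] re-enters the window after having fully left it (A never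
-- deletes zero-count keys, so its distinct counter is permanently understated from then on) and
-- a duplicate-free window starts at some later t, A undercounts; B returns the true count of
-- all-distinct windows, which is what the docstring specifies.
def D_sliding_window_distinct (nums : List Int) (k : Int) : Prop :=
  0 < k ∧ ∃ t < nums.length - k.toNat + 1, ((nums.drop t).take k.toNat).Nodup ∧
    ∃ j < t, nums.getD (k.toNat + j) 0 ∈ nums.take j ∧
      nums.getD (k.toNat + j) 0 ∉ (nums.drop j).take k.toNat
instance (nums : List Int) (k : Int) : Decidable (D_sliding_window_distinct nums k) := by
  unfold D_sliding_window_distinct; infer_instance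

def Spec_sliding_window_distinct (nums : List Int) (k : Int) (out : Int) : Prop :=
  ¬ D_sliding_window_distinct nums k → out = sliding_window_distinct_alt nums k
instance (nums : List Int) (k : Int) (out : Int) : Decidable (Spec_sliding_window_distinct nums k out) := by
  unfold Spec_sliding_window_distinct; infer_instance

def pvDiffWitness_sliding_window_distinct : List Int × Int := ([1, 2, 3, 1], 2)
def pvDiffWitnessOut_sliding_window_distinct : Int × Int := (2, 3)

-- ===== CLAIM (what is proved, stated in full; the proofs are below) =====
def Claim_unchanged_sliding_window_distinct : Prop := ∀ (nums : List Int) (k : Int), Dom_sliding_window_distinct nums k → Spec_sliding_window_distinct nums k (sliding_window_distinct nums k)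
def Claim_changed_sliding_window_distinct : Prop := Dom_sliding_window_distinct (pvDiffWitness_sliding_window_distinct.1) (pvDiffWitness_sliding_window_distinct.2) ∧ D_sliding_window_distinct (pvDiffWitness_sliding_window_distinct.1) (pvDiffWitness_sliding_window_distinct.2) ∧ sliding_window_distinct (pvDiffWitness_sliding_window_distinct.1) (pvDiffWitness_sliding_window_distinct.2) = pvDiffWitnessOut_sliding_window_distinct.1 ∧ sliding_window_distinct_alt (pvDiffWitness_sliding_window_distinct.1) (pvDiffWitness_sliding_window_distinct.2) = pvDiffWitnessOut_sliding_window_distinct.2 ∧ pvDiffWitnessOut_sliding_window_distinct.1 ≠ pvDiffWitnessOut_sliding_window_distinct.2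
def Claim_exact_sliding_window_distinct : Prop := ∀ (nums : List Int) (k : Int), Dom_sliding_window_distinct nums k → D_sliding_window_distinct nums k → sliding_window_distinct nums k ≠ sliding_window_distinct_alt nums k

-- ===== LEMMAS AND PROOFS =====

-- The window of size K starting at t; A's stale-counter trigger at slide step j; number of
-- distinct values in window t; number of triggers among the first e slide steps; first trigger
-- position (or n-K if none).
def swdWin (nums : List Int) (K t : Nat) : List Int := (nums.drop t).take K
def swdTrig (nums : List Int) (K j : Nat) : Bool :=
  decide (nums.getD (K + j) 0 ∈ nums.take j ∧ nums.getD (K + j) 0 ∉ swdWin nums K j)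

lemma swd_D_iff (nums : List Int) (k : Int) :
    D_sliding_window_distinct nums k ↔ 0 < k ∧
      ∃ t < nums.length - k.toNat + 1, (swdWin nums k.toNat t).Nodup ∧
        ∃ j < t, swdTrig nums k.toNat j = true := by
  unfold D_sliding_window_distinct swdTrig swdWin
  simp

def swdDist (nums : List Int) (K e : Nat) : Nat := (swdWin nums K e).toFinset.card
def swdDefi (nums : List Int) (K e : Nat) : Nat := (List.range e).countP (swdTrig nums K)
def swdM (nums : List Int) (K N : Nat) : Nat :=
  ((List.range (N - K)).takeWhile (fun j => !swdTrig nums K j)).length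

def swdAdd (st : PySem.Dict Int Int × Int) (v : Int) : PySem.Dict Int Int × Int :=
  if st.1.contains v then (st.1.modify v 0 (· + 1), st.2) else (st.1.insert v 1, st.2 + 1)

def swdBody2 (nums : List Int) (k : Int) (K : Nat)
    (st : PySem.Dict Int Int × Int × Int) (j : Nat) : PySem.Dict Int Int × Int × Int :=
  let x := nums.getD (K + j) 0
  let st' : PySem.Dict Int Int × Int :=
    if st.1.contains x then (st.1.modify x 0 (· + 1), st.2.1)
    else (st.1.insert x 1, st.2.1 + 1)
  let o := nums.getD j 0
  let freq2 := st'.1.modify o 0 (· - 1)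
  let dc2 := if freq2.getD o 0 = 0 then st'.2 - 1 else st'.2
  let res2 := if dc2 = k then st.2.2 + 1 else st.2.2
  (freq2, dc2, res2)

lemma swd_dlen (l : List Int) : (PySem.Set.ofList l).length = l.toFinset.card := by
  have hnd : (PySem.Set.ofList l : List Int).Nodup := PySem.Set.nodup_ofList l
  rw [← List.toFinset_card_of_nodup hnd]
  congr 1
  ext x
  simp [PySem.Set.mem_ofList]

lemma swd_foldl_range_getD {α : Type} (f : α → Int → α) (nums : List Int) (K : Nat)
    (hK : K ≤ nums.length) (init : α) :
    (List.range K).foldl (fun a j => f a (nums.getD j 0)) init = (nums.take K).foldl f init := by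
  induction K with
  | zero => simp
  | succ K ih =>
    have hK' : K < nums.length := by omega
    rw [List.range_succ, List.foldl_append, ih (by omega), List.take_add_one,
      List.getElem?_eq_getElem hK', List.foldl_append]
    simp [List.getD, List.getElem?_eq_getElem hK']

lemma swd_card_append (l : List Int) (x : Int) :
    (l ++ [x]).toFinset.card = l.toFinset.card + (if x ∈ l then 0 else 1) := by
  rw [List.toFinset_append]
  have h1 : ([x] : List Int).toFinset = {x} := by simp
  rw [h1, Finset.union_singleton]
  by_cases hx : x ∈ l
  · rw [Finset.insert_eq_self.mpr (List.mem_toFinset.mpr hx)]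
    simp [hx]
  · rw [Finset.card_insert_of_notMem (by simp [hx])]
    simp [hx]

lemma swd_card_cons (x : Int) (l : List Int) :
    (x :: l).toFinset.card = l.toFinset.card + (if x ∈ l then 0 else 1) := by
  rw [List.toFinset_cons]
  by_cases hx : x ∈ l
  · rw [Finset.insert_eq_self.mpr (List.mem_toFinset.mpr hx)]
    simp [hx]
  · rw [Finset.card_insert_of_notMem (by simp [hx])]
    simp [hx]

lemma swd_loop1_spec (l : List Int) :
    (∀ v, (l.foldl swdAdd (PySem.Dict.empty, 0)).1.getD v 0 = (l.count v : Int)) ∧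
    (∀ v, (l.foldl swdAdd (PySem.Dict.empty, 0)).1.contains v = true ↔ v ∈ l) ∧
    (l.foldl swdAdd (PySem.Dict.empty, 0)).2 = (l.toFinset.card : Int) := by
  induction l using List.reverseRecOn with
  | nil => simp [PySem.Dict.getD_empty, PySem.Dict.contains_empty]
  | append_singleton l x ih =>
    obtain ⟨ih1, ih2, ih3⟩ := ih
    rw [List.foldl_append, List.foldl_cons, List.foldl_nil]
    set st := l.foldl swdAdd (PySem.Dict.empty, (0 : Int)) with hst
    by_cases hcx : st.1.contains x = true
    · have hxl : x ∈ l := (ih2 x).mp hcx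
      refine ⟨?_, ?_, ?_⟩
      · intro v
        simp only [swdAdd, if_pos hcx, PySem.Dict.getD_modify, List.count_append,
          List.count_singleton]
        by_cases hv : v = x
        · simp [hv, ih1 x]
        · simp [hv, Ne.symm hv, ih1 v]
      · intro v
        simp only [swdAdd, if_pos hcx, PySem.Dict.contains_modify]
        simp only [Bool.or_eq_true, beq_iff_eq, ih2 v, List.mem_append, List.mem_singleton]
        tauto
      · simp only [swdAdd, if_pos hcx, ih3, swd_card_append, if_pos hxl]
        push_cast
        ring
    · have hxl : x ∉ l := fun h => hcx ((ih2 x).mpr h)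
      have hcount : l.count x = 0 := List.count_eq_zero.mpr hxl
      refine ⟨?_, ?_, ?_⟩
      · intro v
        simp only [swdAdd, if_neg hcx, PySem.Dict.getD_insert, List.count_append,
          List.count_singleton]
        by_cases hv : v = x
        · simp [hv, hcount]
        · simp [hv, Ne.symm hv, ih1 v]
      · intro v
        simp only [swdAdd, if_neg hcx, PySem.Dict.contains_insert]
        simp only [Bool.or_eq_true, beq_iff_eq, ih2 v, List.mem_append, List.mem_singleton]
        tauto
      · simp only [swdAdd, if_neg hcx, ih3, swd_card_append, if_neg hxl]
        push_cast
        ring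

lemma swd_defi_succ (nums : List Int) (K e : Nat) :
    swdDefi nums K (e+1) = swdDefi nums K e + (if swdTrig nums K e then 1 else 0) := by
  unfold swdDefi
  rw [List.range_succ, List.countP_append, List.countP_singleton]

lemma swd_wfull_left (nums : List Int) (K e : Nat) (h : K + e < nums.length) :
    (nums.drop e).take (K+1) = swdWin nums K e ++ [nums.getD (K + e) 0] := by
  rw [List.take_add_one]
  have h1 : (nums.drop e)[K]? = some (nums.getD (K + e) 0) := by
    rw [List.getElem?_drop]
    have hek : e + K = K + e := Nat.add_comm e K
    rw [hek, List.getElem?_eq_getElem h, List.getD_eq_getElem nums 0 h]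
  rw [h1]
  rfl

lemma swd_wfull_right (nums : List Int) (K e : Nat) (h : e < nums.length) :
    (nums.drop e).take (K+1) = nums.getD e 0 :: swdWin nums K (e+1) := by
  rw [List.drop_eq_getElem_cons h, List.take_succ_cons,
    List.getD_eq_getElem nums 0 h]
  rfl

lemma swd_take_split (nums : List Int) (K e : Nat) :
    nums.take (K+e) = nums.take e ++ swdWin nums K e := by
  rw [Nat.add_comm K e, List.take_add]
  rfl

lemma swd_take_succ (nums : List Int) (K e : Nat) (h : K + e < nums.length) :
    nums.take (K+(e+1)) = nums.take (K+e) ++ [nums.getD (K + e) 0] := by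
  have h2 : K + (e+1) = (K+e) + 1 := by omega
  rw [h2, List.take_add_one, List.getElem?_eq_getElem h,
    List.getD_eq_getElem nums 0 h]
  rfl

lemma swd_slide_aux (nums : List Int) (K e : Nat)
    (he : K + (e+1) ≤ nums.length)
    (freq1 : PySem.Dict Int Int) (dc1 : Int)
    (G1 : ∀ v, freq1.getD v 0 = (((swdWin nums K e) ++ [nums.getD (K+e) 0]).count v : Int))
    (G3 : dc1 = (((swdWin nums K e) ++ [nums.getD (K+e) 0]).toFinset.card : Int)
                - (swdDefi nums K (e+1) : Int)) :
    (∀ v, (freq1.modify (nums.getD e 0) 0 (· - 1)).getD v 0 = ((swdWin nums K (e+1)).count v : Int)) ∧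
    ((if (freq1.modify (nums.getD e 0) 0 (· - 1)).getD (nums.getD e 0) 0 = 0 then dc1 - 1 else dc1)
       = (swdDist nums K (e+1) : Int) - (swdDefi nums K (e+1) : Int)) := by
  have hKe : K + e < nums.length := by omega
  have heN : e < nums.length := by omega
  have hcons : swdWin nums K e ++ [nums.getD (K+e) 0] = nums.getD e 0 :: swdWin nums K (e+1) :=
    (swd_wfull_left nums K e hKe).symm.trans (swd_wfull_right nums K e heN)
  set o := nums.getD e 0 with ho
  set W' := swdWin nums K (e+1) with hW'
  have hget : ∀ v, (freq1.modify o 0 (· - 1)).getD v 0 = (W'.count v : Int) := by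
    intro v
    rw [PySem.Dict.getD_modify]
    by_cases hv : v = o
    · rw [if_pos hv, G1 o, hcons, List.count_cons, hv]
      simp
    · rw [if_neg hv, G1 v, hcons, List.count_cons]
      simp [Ne.symm hv]
  refine ⟨hget, ?_⟩
  have hcard : ((swdWin nums K e ++ [nums.getD (K+e) 0]).toFinset.card : Nat)
      = W'.toFinset.card + (if o ∈ W' then 0 else 1) := by
    rw [hcons, swd_card_cons]
  rw [hget o]
  unfold swdDist
  by_cases hmem : o ∈ W'
  · have hne : W'.count o ≠ 0 := fun h => (List.count_eq_zero.mp h) hmem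
    rw [if_neg (by exact_mod_cast hne), G3, hcard, if_pos hmem]
    push_cast
    ring
  · have hz : W'.count o = 0 := List.count_eq_zero.mpr hmem
    rw [if_pos (by exact_mod_cast hz), G3, hcard, if_neg hmem]
    push_cast
    ring

lemma swd_loop2_spec (nums : List Int) (k : Int) (K : Nat) (hk : k = (K : Int)) (h0 : 0 < K)
    (hKn : K ≤ nums.length) (r0 : Int) (e : Nat) (he : K + e ≤ nums.length)
    (f0 : PySem.Dict Int Int × Int)
    (hf : ∀ v, f0.1.getD v 0 = ((swdWin nums K 0).count v : Int))
    (hc : ∀ v, f0.1.contains v = true ↔ v ∈ nums.take K)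
    (hd : f0.2 = (swdDist nums K 0 : Int)) :
    (∀ v, ((List.range e).foldl (swdBody2 nums k K) (f0.1, f0.2, r0)).1.getD v 0
        = ((swdWin nums K e).count v : Int)) ∧
    (∀ v, ((List.range e).foldl (swdBody2 nums k K) (f0.1, f0.2, r0)).1.contains v = true
        ↔ v ∈ nums.take (K + e)) ∧
    ((List.range e).foldl (swdBody2 nums k K) (f0.1, f0.2, r0)).2.1
        = (swdDist nums K e : Int) - (swdDefi nums K e : Int) ∧
    ((List.range e).foldl (swdBody2 nums k K) (f0.1, f0.2, r0)).2.2
        = r0 + ((List.range e).countP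
            (fun j => decide ((swdDist nums K (j+1) : Int) - (swdDefi nums K (j+1) : Int) = k)) : Int) := by
  revert he
  induction e with
  | zero =>
    intro he
    simp only [List.range_zero, List.foldl_nil]
    refine ⟨hf, ?_, ?_, by simp [swdDefi]⟩
    · simpa using hc
    · simp [hd, swdDefi]
  | succ e ih =>
    intro he
    obtain ⟨ih1, ih2, ih3, ih4⟩ := ih (by omega)
    rw [List.range_succ, List.foldl_append, List.foldl_cons, List.foldl_nil]
    set st := (List.range e).foldl (swdBody2 nums k K) (f0.1, f0.2, r0) with hst
    have hKe : K + e < nums.length := by omega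
    have heN : e < nums.length := by omega
    set x := nums.getD (K + e) 0 with hx
    set W := swdWin nums K e with hW
    have hsplit : nums.take (K+e) = nums.take e ++ W := swd_take_split nums K e
    have htks : nums.take (K+(e+1)) = nums.take (K+e) ++ [x] := swd_take_succ nums K e hKe
    have hcardapp : (W ++ [x]).toFinset.card = W.toFinset.card + (if x ∈ W then 0 else 1) :=
      swd_card_append W x
    have htrig : swdTrig nums K e = decide (x ∈ nums.take e ∧ x ∉ W) := by
      unfold swdTrig
      rfl
    have ho_mem : nums.getD e 0 ∈ W := by
      rw [hW]
      unfold swdWin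
      rw [List.drop_eq_getElem_cons heN, List.getD_eq_getElem nums 0 heN]
      obtain ⟨K', rfl⟩ : ∃ K', K = K' + 1 := ⟨K - 1, by omega⟩
      rw [List.take_succ_cons]
      exact List.mem_cons_self
    have ho_take : nums.getD e 0 ∈ nums.take (K+e) := by
      rw [hsplit]
      exact List.mem_append.mpr (Or.inr ho_mem)
    have hbody : swdBody2 nums k K st e =
        (let st' : PySem.Dict Int Int × Int :=
          if st.1.contains x then (st.1.modify x 0 (· + 1), st.2.1)
          else (st.1.insert x 1, st.2.1 + 1)
         let o := nums.getD e 0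
         let freq2 := st'.1.modify o 0 (· - 1)
         let dc2 := if freq2.getD o 0 = 0 then st'.2 - 1 else st'.2
         let res2 := if dc2 = k then st.2.2 + 1 else st.2.2
         (freq2, dc2, res2)) := rfl
    have hG2 : ∀ (freq1 : PySem.Dict Int Int),
        (∀ v, freq1.contains v = (v == x || st.1.contains v)) →
        ∀ v, (freq1.modify (nums.getD e 0) 0 (· - 1)).contains v = true
          ↔ v ∈ nums.take (K + (e+1)) := by
      intro freq1 hcont v
      rw [PySem.Dict.contains_modify, htks]
      simp only [Bool.or_eq_true, beq_iff_eq, hcont v, ih2 v, List.mem_append,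
        List.mem_singleton]
      constructor
      · rintro (rfl | rfl | hv)
        · exact Or.inl ho_take
        · exact Or.inr rfl
        · exact Or.inl hv
      · rintro (hv | rfl)
        · exact Or.inr (Or.inr hv)
        · exact Or.inr (Or.inl rfl)
    by_cases hcx : st.1.contains x = true
    · -- x seen before: freq[x] += 1, distinct_count unchanged
      have hseen : x ∈ nums.take (K+e) := (ih2 x).mp hcx
      have hG1 : ∀ v, (st.1.modify x 0 (· + 1)).getD v 0 = ((W ++ [x]).count v : Int) := by
        intro v
        rw [PySem.Dict.getD_modify]
        by_cases hv : v = x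
        · rw [if_pos hv, hv, ih1 x]
          simp [List.count_append, List.count_singleton]
        · rw [if_neg hv, ih1 v]
          simp [List.count_append, List.count_singleton, Ne.symm hv]
      have hG3 : st.2.1 = ((W ++ [x]).toFinset.card : Int) - (swdDefi nums K (e+1) : Int) := by
        rw [ih3, swd_defi_succ, htrig, hcardapp]
        have hor : x ∈ nums.take e ∨ x ∈ W := by
          rw [hsplit] at hseen
          simpa using hseen
        by_cases hxW : x ∈ W
        · simp only [hxW, not_true, and_false, decide_false, if_pos hxW]
          unfold swdDist
          push_cast
          ring
        · have hxe : x ∈ nums.take e := hor.resolve_right hxW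
          simp only [hxW, not_false_iff, hxe, and_true, true_and, decide_true, if_neg hxW]
          unfold swdDist
          push_cast
          ring
      obtain ⟨hA, hB⟩ := swd_slide_aux nums K e he (st.1.modify x 0 (· + 1)) st.2.1 hG1 hG3
      rw [hbody]
      simp only [if_pos hcx]
      refine ⟨hA, hG2 _ (fun v => PySem.Dict.contains_modify st.1 x v 0 (· + 1)), hB, ?_⟩
      · simp only [List.countP_append, List.countP_singleton, ih4, hB]
        by_cases hres : (swdDist nums K (e+1) : Int) - (swdDefi nums K (e+1) : Int) = k
        · simp [hres]
          try push_cast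
          try omega
        · simp [hres]
    · -- x never seen: freq[x] = 1, distinct_count += 1
      have hseen : x ∉ nums.take (K+e) := fun h => hcx ((ih2 x).mpr h)
      have hxW : x ∉ W := fun h => hseen (by rw [hsplit]; simp [h])
      have hxe : x ∉ nums.take e := fun h => hseen (by rw [hsplit]; simp [h])
      have hG1 : ∀ v, (st.1.insert x 1).getD v 0 = ((W ++ [x]).count v : Int) := by
        intro v
        rw [PySem.Dict.getD_insert]
        by_cases hv : v = x
        · have hzero : W.count x = 0 := List.count_eq_zero.mpr hxW
          rw [if_pos hv, hv]
          simp [List.count_append, List.count_singleton, hzero]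
        · rw [if_neg hv, ih1 v]
          simp [List.count_append, List.count_singleton, Ne.symm hv]
      have hG3 : st.2.1 + 1 = ((W ++ [x]).toFinset.card : Int) - (swdDefi nums K (e+1) : Int) := by
        rw [ih3, swd_defi_succ, htrig, hcardapp]
        simp only [hxe, false_and, decide_false, if_neg hxW]
        unfold swdDist
        push_cast
        ring
      obtain ⟨hA, hB⟩ := swd_slide_aux nums K e he (st.1.insert x 1) (st.2.1 + 1) hG1 hG3
      rw [hbody]
      simp only [if_neg hcx]
      refine ⟨hA, hG2 _ (fun v => PySem.Dict.contains_insert st.1 x v 1), hB, ?_⟩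
      · simp only [List.countP_append, List.countP_singleton, ih4, hB]
        by_cases hres : (swdDist nums K (e+1) : Int) - (swdDefi nums K (e+1) : Int) = k
        · simp [hres]
          try push_cast
          try omega
        · simp [hres]

lemma swd_M_le (nums : List Int) (K N : Nat) : swdM nums K N ≤ N - K := by
  unfold swdM
  calc ((List.range (N - K)).takeWhile (fun j => !swdTrig nums K j)).length
      ≤ (List.range (N - K)).length := (List.takeWhile_prefix _).length_le
    _ = N - K := List.length_range

lemma swd_takeWhile_range (p : Nat → Bool) (n : Nat) :
    (List.range n).takeWhile p = List.range ((List.range n).takeWhile p).length := by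
  have hle : ((List.range n).takeWhile p).length ≤ n := by
    have h := (List.takeWhile_prefix p (l := List.range n)).length_le
    simpa using h
  conv_lhs => rw [List.prefix_iff_eq_take.mp (List.takeWhile_prefix p (l := List.range n))]
  rw [List.take_range, Nat.min_eq_left hle]

lemma swd_M_before (nums : List Int) (K N : Nat) {j : Nat} (hj : j < swdM nums K N) :
    swdTrig nums K j = false := by
  have hmem : j ∈ (List.range (N - K)).takeWhile (fun t => !swdTrig nums K t) := by
    rw [swd_takeWhile_range]
    exact List.mem_range.mpr hj
  have h := List.mem_takeWhile_imp hmem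
  simpa using h

lemma swd_M_stop (nums : List Int) (K N : Nat) (h : swdM nums K N < N - K) :
    swdTrig nums K (swdM nums K N) = true := by
  set p : Nat → Bool := fun t => !swdTrig nums K t with hp
  set l := List.range (N - K) with hl
  set M := swdM nums K N with hM
  have hMlen : M = (l.takeWhile p).length := rfl
  have htake : l.takeWhile p = l.take M := by
    conv_lhs => rw [List.prefix_iff_eq_take.mp (List.takeWhile_prefix p (l := l))]
    rw [hMlen]
  have hdrop : l.dropWhile p = l.drop M := by
    have h1 : l.takeWhile p ++ l.dropWhile p = l := List.takeWhile_append_dropWhile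
    have h2 : l.take M ++ l.drop M = l := List.take_append_drop M l
    rw [htake] at h1
    exact List.append_cancel_left (h1.trans h2.symm)
  have hhead : (l.dropWhile p).head? = some M := by
    rw [hdrop, List.head?_drop, hl, List.getElem?_range h]
  have hnot := List.head?_dropWhile_not p l
  rw [hhead] at hnot
  simpa [hp] using hnot

lemma swd_dist_le (nums : List Int) (K e : Nat) : swdDist nums K e ≤ K := by
  unfold swdDist swdWin
  calc ((nums.drop e).take K).toFinset.card ≤ ((nums.drop e).take K).length :=
        List.toFinset_card_le _
    _ ≤ K := List.length_take_le K _

lemma swd_count_eq (nums : List Int) (k : Int) (K N : Nat) (hk : k = (K : Int))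
    (hN : N = nums.length) (h0 : 0 < K) (hKN : K ≤ N) :
    (if (swdDist nums K 0 : Int) = k then (0:Int) + 1 else 0)
      + ((List.range (N - K)).countP
          (fun j => decide ((swdDist nums K (j+1) : Int) - (swdDefi nums K (j+1) : Int) = k)) : Int)
    = ((List.range (swdM nums K N + 1)).countP (fun t => decide ((swdDist nums K t : Int) = k)) : Int) := by
  set M := swdM nums K N with hM
  have hMle : M ≤ N - K := swd_M_le nums K N
  have hsplit : N - K = M + (N - K - M) := by omega
  rw [hsplit, List.range_add, List.countP_append]
  have h2 : ((List.range (N - K - M)).map (fun t => M + t)).countP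
      (fun j => decide ((swdDist nums K (j+1) : Int) - (swdDefi nums K (j+1) : Int) = k)) = 0 := by
    rw [List.countP_eq_zero]
    intro a ha
    simp only [List.mem_map, List.mem_range] at ha
    obtain ⟨t, ht, rfl⟩ := ha
    have hMlt : M < N - K := by omega
    have htrig := swd_M_stop nums K N hMlt
    have hpos : 0 < swdDefi nums K (M + t + 1) := by
      apply List.countP_pos_iff.mpr
      exact ⟨M, List.mem_range.mpr (by omega), htrig⟩
    have hdle : swdDist nums K (M + t + 1) ≤ K := swd_dist_le nums K (M + t + 1)
    simp only [decide_eq_true_eq]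
    omega
  rw [h2]
  have h1 : (List.range M).countP
      (fun j => decide ((swdDist nums K (j+1) : Int) - (swdDefi nums K (j+1) : Int) = k))
      = (List.range M).countP (fun j => decide ((swdDist nums K (j+1) : Int) = k)) := by
    apply List.countP_congr
    intro j hj
    rw [List.mem_range] at hj
    have hdefi : swdDefi nums K (j+1) = 0 := by
      apply List.countP_eq_zero.mpr
      intro a ha
      rw [List.mem_range] at ha
      rw [swd_M_before nums K N (show a < M by omega)]
      simp
    simp only [decide_eq_true_eq, hdefi]
    constructor <;> intro hh <;> push_cast at * <;> omega
  rw [h1]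
  rw [List.range_succ_eq_map, List.countP_cons, List.countP_map]
  have hcomp : ((fun t => decide ((swdDist nums K t : Int) = k)) ∘ Nat.succ)
      = (fun j => decide ((swdDist nums K (j+1) : Int) = k)) := rfl
  rw [hcomp]
  by_cases h0' : (swdDist nums K 0 : Int) = k
  · rw [if_pos h0', decide_eq_true h0']
    simp
    push_cast
    ring
  · rw [if_neg h0', decide_eq_false h0']
    simp

lemma swd_portA_eq (nums : List Int) (k : Int) (K : Nat) (hk : k = (K : Int)) (h0 : 0 < K)
    (hKn : K ≤ nums.length) :
    sliding_window_distinct nums k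
      = (if (swdDist nums K 0 : Int) = k then (0:Int) + 1 else 0)
        + ((List.range (nums.length - K)).countP
            (fun j => decide ((swdDist nums K (j+1) : Int) - (swdDefi nums K (j+1) : Int) = k)) : Int) := by
  have hguard : ¬ (k > (nums.length : Int) ∨ k ≤ 0) := by
    push_neg
    refine ⟨?_, by omega⟩
    have h1 : (K : Int) ≤ (nums.length : Int) := by exact_mod_cast hKn
    omega
  unfold sliding_window_distinct
  simp only [if_neg hguard]
  -- first loop: a fold of swdAdd over the first K elements
  rw [PySem.List.pyRange_one 0 k, show (k - 0).toNat = K by omega, List.foldl_map]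
  have hfun1 : (fun (st : PySem.Dict Int Int × Int) (j : Nat) =>
        let val := PySem.List.pyGetD nums ((0 : Int) + (j : Int)) 0
        if st.1.contains val then (st.1.modify val 0 (· + 1), st.2)
        else (st.1.insert val 1, st.2 + 1))
      = (fun (st : PySem.Dict Int Int × Int) (j : Nat) => swdAdd st (nums.getD j 0)) := by
    funext st j
    show swdAdd st (PySem.List.pyGetD nums ((0 : Int) + (j : Int)) 0) = swdAdd st (nums.getD j 0)
    rw [zero_add, PySem.List.pyGetD_natCast]
  rw [hfun1, swd_foldl_range_getD swdAdd nums K hKn]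
  obtain ⟨hf1, hf2, hf3⟩ := swd_loop1_spec (nums.take K)
  set f0 : PySem.Dict Int Int × Int := (nums.take K).foldl swdAdd (PySem.Dict.empty, (0:Int)) with hf0
  have hwin0 : swdWin nums K 0 = nums.take K := by
    unfold swdWin
    rw [List.drop_zero]
  have hd0 : f0.2 = (swdDist nums K 0 : Int) := by
    rw [hf3]
    unfold swdDist
    rw [hwin0]
  -- second loop: a fold of swdBody2 over the slide steps
  rw [PySem.List.pyRange_one k (nums.length : Int),
    show ((nums.length : Int) - k).toNat = nums.length - K by omega, List.foldl_map]
  have hfun2 : (fun (st : PySem.Dict Int Int × Int × Int) (j : Nat) =>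
        let new_val := PySem.List.pyGetD nums (k + (j : Int)) 0
        let st' : PySem.Dict Int Int × Int :=
          if st.1.contains new_val then (st.1.modify new_val 0 (· + 1), st.2.1)
          else (st.1.insert new_val 1, st.2.1 + 1)
        let old_val := PySem.List.pyGetD nums (k + (j : Int) - k) 0
        let freq2 := st'.1.modify old_val 0 (· - 1)
        let dc2 := if freq2.getD old_val 0 = 0 then st'.2 - 1 else st'.2
        let res2 := if dc2 = k then st.2.2 + 1 else st.2.2
        (freq2, dc2, res2))
      = swdBody2 nums k K := by
    funext st j
    have e1 : k + (j : Int) = ((K + j : Nat) : Int) := by push_cast; omega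
    have e2 : k + (j : Int) - k = ((j : Nat) : Int) := by ring
    show (let new_val := PySem.List.pyGetD nums (k + (j : Int)) 0
          let st' : PySem.Dict Int Int × Int :=
            if st.1.contains new_val then (st.1.modify new_val 0 (· + 1), st.2.1)
            else (st.1.insert new_val 1, st.2.1 + 1)
          let old_val := PySem.List.pyGetD nums (k + (j : Int) - k) 0
          let freq2 := st'.1.modify old_val 0 (· - 1)
          let dc2 := if freq2.getD old_val 0 = 0 then st'.2 - 1 else st'.2
          let res2 := if dc2 = k then st.2.2 + 1 else st.2.2
          (freq2, dc2, res2)) = swdBody2 nums k K st j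
    unfold swdBody2
    rw [e2, e1, PySem.List.pyGetD_natCast, PySem.List.pyGetD_natCast]
  rw [hfun2]
  obtain ⟨_, _, _, hres⟩ := swd_loop2_spec nums k K hk h0 hKn
      (if f0.2 = k then (0:Int) + 1 else 0) (nums.length - K) (by omega) f0
      (by rw [hwin0]; exact hf1) hf2 hd0
  rw [hres, hd0]

lemma swd_portA_count (nums : List Int) (k : Int) (K : Nat) (hk : k = (K : Int)) (h0 : 0 < K)
    (hKn : K ≤ nums.length) :
    sliding_window_distinct nums k
      = ((List.range (swdM nums K nums.length + 1)).countP
          (fun t => decide ((swdDist nums K t : Int) = k)) : Int) := by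
  rw [swd_portA_eq nums k K hk h0 hKn]
  exact swd_count_eq nums k K nums.length hk rfl h0 (by omega)

lemma swd_portB_eq (nums : List Int) (k : Int) (K : Nat) (hk : k = (K : Int)) (h0 : 0 < K)
    (hKn : K ≤ nums.length) :
    sliding_window_distinct_alt nums k
      = ((List.range (nums.length - K + 1)).countP
          (fun t => decide ((swdDist nums K t : Int) = k)) : Int) := by
  have hguard : ¬ (k > (nums.length : Int) ∨ k ≤ 0) := by
    push_neg
    refine ⟨?_, by omega⟩
    have h1 : (K : Int) ≤ (nums.length : Int) := by exact_mod_cast hKn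
    omega
  unfold sliding_window_distinct_alt
  simp only [if_neg hguard]
  rw [PySem.List.pyRange_one 0 ((nums.length : Int) - k + 1),
    show (((nums.length : Int) - k + 1) - 0).toNat = nums.length - K + 1 by omega,
    List.foldl_map, PySem.List.foldl_ite_add_one]
  rw [List.countP_congr (q := fun t => decide ((swdDist nums K t : Int) = k)) ?_]
  · simp
  · intro t htmem
    rw [List.mem_range] at htmem
    simp only [decide_eq_true_eq]
    simp only [zero_add]
    rw [hk, PySem.List.slice_natCast_add, swd_dlen]
    simp [swdDist, swdWin]

-- dist t = k iff window t is duplicate-free (window t has full length K when t ≤ n - K)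
lemma swd_dist_iff_nodup (nums : List Int) (k : Int) (K t : Nat) (hk : k = (K : Int))
    (hKn : K ≤ nums.length) (ht : t ≤ nums.length - K) :
    (swdDist nums K t : Int) = k ↔ (swdWin nums K t).Nodup := by
  have hlen : (swdWin nums K t).length = K := by
    unfold swdWin
    rw [List.length_take, List.length_drop]
    omega
  unfold swdDist
  rw [hk]
  constructor
  · intro h
    have hcard : (swdWin nums K t).toFinset.card = (swdWin nums K t).length := by
      rw [hlen]; exact_mod_cast h
    have hded : (swdWin nums K t).dedup.length = (swdWin nums K t).length := by
      rw [← List.card_toFinset, hcard]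
    exact List.dedup_eq_self.mp ((List.dedup_sublist _).eq_of_length hded)
  · intro h
    rw [List.toFinset_card_of_nodup h, hlen]

-- windows strictly after a trigger are exactly those with index > swdM
lemma swd_gt_M_iff (nums : List Int) (K t : Nat) (hK : 0 < K) (ht : t ≤ nums.length - K) :
    (∃ j < t, swdTrig nums K j = true) ↔ swdM nums K nums.length < t := by
  constructor
  · rintro ⟨j, hj, htrig⟩
    by_contra hle
    push_neg at hle
    have := swd_M_before nums K nums.length (show j < swdM nums K nums.length by omega)
    rw [htrig] at this
    exact Bool.true_eq_false.mp this
  · intro hMt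
    have hMlt : swdM nums K nums.length < nums.length - K := by omega
    exact ⟨swdM nums K nums.length, hMt, swd_M_stop nums K nums.length hMlt⟩

-- ===== VERDICT (by name: the statement is the Claim_ definition above) =====
theorem sliding_window_distinct_spec : Claim_unchanged_sliding_window_distinct := by
  intro nums k _
  unfold Spec_sliding_window_distinct
  intro hnD
  by_cases hg : k > (nums.length : Int) ∨ k ≤ 0
  · unfold sliding_window_distinct sliding_window_distinct_alt
    rw [if_pos hg, if_pos hg]
  · push_neg at hg
    obtain ⟨hkn, hk0⟩ := hg
    set K := k.toNat with hK
    have hkK : k = (K : Int) := by omega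
    have h0 : 0 < K := by omega
    have hKn : K ≤ nums.length := by omega
    rw [swd_portA_count nums k K hkK h0 hKn, swd_portB_eq nums k K hkK h0 hKn]
    set M := swdM nums K nums.length with hM
    have hMle : M ≤ nums.length - K := swd_M_le nums K nums.length
    have hsplit : nums.length - K + 1 = (M + 1) + (nums.length - K - M) := by omega
    have hB : List.range (nums.length - K + 1)
        = List.range (M + 1) ++ (List.range (nums.length - K - M)).map (fun t => (M + 1) + t) := by
      rw [hsplit, List.range_add]
    rw [hB, List.countP_append]
    have htail : ((List.range (nums.length - K - M)).map (fun t => (M + 1) + t)).countP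
        (fun t => decide ((swdDist nums K t : Int) = k)) = 0 := by
      rw [List.countP_eq_zero]
      intro a ha
      simp only [List.mem_map, List.mem_range] at ha
      obtain ⟨t', ht', rfl⟩ := ha
      simp only [decide_eq_true_eq]
      intro hdist
      apply hnD
      apply (swd_D_iff nums k).mpr
      refine ⟨by omega, M + 1 + t', by omega, ?_, ?_⟩
      · rw [show k.toNat = K from rfl]
        exact (swd_dist_iff_nodup nums k K (M + 1 + t') hkK hKn (by omega)).mp hdist
      · rw [show k.toNat = K from rfl]
        exact (swd_gt_M_iff nums K (M + 1 + t') h0 (by omega)).mpr (by omega)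
    rw [htail]
    simp

theorem sliding_window_distinct_changed : Claim_changed_sliding_window_distinct := by
  unfold Claim_changed_sliding_window_distinct
  decide

theorem sliding_window_distinct_tight : Claim_exact_sliding_window_distinct := by
  intro nums k _ hD
  obtain ⟨hk0, t, ht, hnd, hex⟩ := (swd_D_iff nums k).mp hD
  set K := k.toNat with hK
  have hkK : k = (K : Int) := by omega
  have h0 : 0 < K := by omega
  have ht1 : 1 ≤ t := by
    obtain ⟨j, hj, _⟩ := hex
    omega
  have hKn : K ≤ nums.length := by omega
  rw [swd_portA_count nums k K hkK h0 hKn, swd_portB_eq nums k K hkK h0 hKn]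
  set M := swdM nums K nums.length with hM
  have hMle : M ≤ nums.length - K := swd_M_le nums K nums.length
  have htle : t ≤ nums.length - K := by omega
  have hMt : M < t := (swd_gt_M_iff nums K t h0 htle).mp hex
  have hdist : (swdDist nums K t : Int) = k :=
    (swd_dist_iff_nodup nums k K t hkK hKn htle).mpr hnd
  have hsplit : nums.length - K + 1 = (M + 1) + (nums.length - K - M) := by omega
  have hB : List.range (nums.length - K + 1)
      = List.range (M + 1) ++ (List.range (nums.length - K - M)).map (fun t' => (M + 1) + t') := by
    rw [hsplit, List.range_add]
  rw [hB, List.countP_append]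
  have htailpos : 0 < ((List.range (nums.length - K - M)).map (fun t' => (M + 1) + t')).countP
      (fun t' => decide ((swdDist nums K t' : Int) = k)) := by
    apply List.countP_pos_iff.mpr
    refine ⟨t, ?_, by simp [hdist]⟩
    simp only [List.mem_map, List.mem_range]
    exact ⟨t - (M + 1), by omega, by omega⟩
  intro heq
  rw [Nat.cast_add] at heq
  omega
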